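-- pv_equiv track=rewrite | github.com/amirali1999/ProcessMining1404 | alpha_miner_service.py | __check_is_unrelated
-- ===== SOURCE A (Python) =====
-- from itertools import product
--
-- def __check_is_unrelated(
--     parallel_relation, causal_relation, item_set_1, item_set_2
-- ):
--     S = set(product(item_set_1, item_set_2)).union(
--         set(product(item_set_2, item_set_1))
--     )
--     for pair in S:
--         if pair in parallel_relation or pair in causal_relation:
--             return True
--     return False
-- ===== SOURCE B (Python) =====
-- def __check_is_unrelated(
--     parallel_relation, causal_relation, item_set_1, item_set_2
-- ):
--     s1 = set(item_set_1)
--     s2 = set(item_set_2)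
--     for x, y in list(parallel_relation) + list(causal_relation):
--         if (x in s1 and y in s2) or (x in s2 and y in s1):
--             return True
--     return False
-- ===== Notes on version B (the rewrite author's own statement) =====
-- stated objective: faster
-- what changed: B iterates once over the relation lists and tests each pair against hash sets of the two item sets, instead of materializing both cross-products as a set and scanning the relation lists for each product pair.
import Mathlib
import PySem

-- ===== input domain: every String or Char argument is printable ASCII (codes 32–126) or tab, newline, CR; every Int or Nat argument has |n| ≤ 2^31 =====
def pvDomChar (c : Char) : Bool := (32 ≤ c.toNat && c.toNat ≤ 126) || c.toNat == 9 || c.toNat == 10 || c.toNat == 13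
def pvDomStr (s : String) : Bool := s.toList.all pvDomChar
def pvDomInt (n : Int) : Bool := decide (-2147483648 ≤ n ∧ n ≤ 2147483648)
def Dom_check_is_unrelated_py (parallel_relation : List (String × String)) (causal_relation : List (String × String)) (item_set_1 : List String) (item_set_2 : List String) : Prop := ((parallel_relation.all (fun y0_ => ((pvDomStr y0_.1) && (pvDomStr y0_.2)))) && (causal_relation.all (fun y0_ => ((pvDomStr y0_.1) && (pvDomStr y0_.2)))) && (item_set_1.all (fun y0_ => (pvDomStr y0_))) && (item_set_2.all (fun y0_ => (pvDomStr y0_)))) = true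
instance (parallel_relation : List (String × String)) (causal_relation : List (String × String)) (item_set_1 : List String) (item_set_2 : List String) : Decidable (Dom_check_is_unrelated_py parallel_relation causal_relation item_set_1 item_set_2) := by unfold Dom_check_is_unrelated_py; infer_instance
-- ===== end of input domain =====

-- B replaces A's cross-product set scanned against the relation lists by a single pass over
-- the relation lists tested against sets of the two item sets (alternative decomposition).

-- ===== PORT A =====
-- itertools.product(xs, ys), in product order
def pvProduct (xs ys : List String) : List (String × String) :=
  xs.flatMap (fun x => ys.map (fun y => (x, y)))

def check_is_unrelated_py (parallel_relation : List (String × String)) (causal_relation : List (String × String)) (item_set_1 : List String) (item_set_2 : List String) : Bool :=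
  -- S = set(product(s1,s2)).union(set(product(s2,s1))); the for-loop with early return is an
  -- order-independent existence test, ported as .any over the Set's elements
  let S : PySem.Set (String × String) :=
    PySem.Set.union (PySem.Set.ofList (pvProduct item_set_1 item_set_2))
      (PySem.Set.ofList (pvProduct item_set_2 item_set_1))
  S.any (fun pair => parallel_relation.contains pair || causal_relation.contains pair)

-- ===== PORT B =====
def check_is_unrelated_py_alt (parallel_relation : List (String × String)) (causal_relation : List (String × String)) (item_set_1 : List String) (item_set_2 : List String) : Bool :=
  let s1 : PySem.Set String := PySem.Set.ofList item_set_1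
  let s2 : PySem.Set String := PySem.Set.ofList item_set_2
  (parallel_relation ++ causal_relation).any (fun p =>
    (PySem.Set.contains s1 p.1 && PySem.Set.contains s2 p.2) ||
    (PySem.Set.contains s2 p.1 && PySem.Set.contains s1 p.2))

-- ===== PRECONDITION & SPEC =====
def Spec_check_is_unrelated_py (parallel_relation : List (String × String)) (causal_relation : List (String × String)) (item_set_1 : List String) (item_set_2 : List String) (out : Bool) : Prop := out = check_is_unrelated_py_alt parallel_relation causal_relation item_set_1 item_set_2
instance (parallel_relation : List (String × String)) (causal_relation : List (String × String)) (item_set_1 : List String) (item_set_2 : List String) (out : Bool) : Decidable (Spec_check_is_unrelated_py parallel_relation causal_relation item_set_1 item_set_2 out) := by unfold Spec_check_is_unrelated_py; infer_instance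

-- ===== CLAIM (what is proved, stated in full; the proofs are below) =====
def Claim_equal_check_is_unrelated_py : Prop := ∀ (parallel_relation : List (String × String)) (causal_relation : List (String × String)) (item_set_1 : List String) (item_set_2 : List String), Dom_check_is_unrelated_py parallel_relation causal_relation item_set_1 item_set_2 → Spec_check_is_unrelated_py parallel_relation causal_relation item_set_1 item_set_2 (check_is_unrelated_py parallel_relation causal_relation item_set_1 item_set_2)

-- ===== LEMMAS AND PROOFS =====
theorem check_both_iff (par caus : List (String × String)) (s1 s2 : List String) :
    check_is_unrelated_py par caus s1 s2 = true ↔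
      check_is_unrelated_py_alt par caus s1 s2 = true := by
  simp only [check_is_unrelated_py, check_is_unrelated_py_alt, pvProduct,
    List.any_eq_true, PySem.Set.mem_union, PySem.Set.mem_ofList,
    List.mem_flatMap, List.mem_map, List.mem_append, List.contains_iff_mem,
    PySem.Set.contains, Bool.or_eq_true, Bool.and_eq_true]
  constructor
  · rintro ⟨⟨a, b⟩, hab, hrel⟩
    refine ⟨(a, b), ?_, ?_⟩
    · rcases hrel with h | h
      · exact Or.inl h
      · exact Or.inr h
    · rcases hab with ⟨x, hx, y, hy, h⟩ | ⟨x, hx, y, hy, h⟩ <;>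
        (cases h; simp_all)
  · rintro ⟨⟨a, b⟩, hrel, hmem⟩
    refine ⟨(a, b), ?_, ?_⟩
    · rcases hmem with ⟨h1, h2⟩ | ⟨h1, h2⟩
      · exact Or.inl ⟨a, h1, b, h2, rfl⟩
      · exact Or.inr ⟨a, h1, b, h2, rfl⟩
    · exact hrel

-- ===== VERDICT (by name: the statement is the Claim_ definition above) =====
theorem check_is_unrelated_py_spec : Claim_equal_check_is_unrelated_py := by
  intro par caus s1 s2 _
  unfold Spec_check_is_unrelated_py
  have := check_both_iff par caus s1 s2
  cases h1 : check_is_unrelated_py par caus s1 s2 <;>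
    cases h2 : check_is_unrelated_py_alt par caus s1 s2 <;> simp_all
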